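-- pv_equiv track=rewrite | github.com/ikokkari/PythonExamples | defdemo.py | leading_digit_list
-- ===== SOURCE A (Python) =====
-- def leading_digit_list(n):
--     prod = 1 # The current factorial
--     digits = [0] * 10 # Create a list full of zeros
--     for i in range(2, n+1):
--         lead = ord(str(prod)[0]) - ord('0') # Compute first digit
--         digits[lead] += 1
--         prod = prod * i # The next factorial from the current one
--     return digits
-- ===== SOURCE B (Python) =====
-- def leading_digit_list(n):
--     # Compute (n-1)! once, then peel the factorials back DOWN by exact integer
--     # division (f //= k recovers (k-1)! from k!), tallying each leading digit.
--     f = 1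
--     for k in range(1, n):
--         f *= k
--     digits = [0] * 10
--     for k in range(n - 1, 0, -1):
--         digits[int(str(f)[0])] += 1
--         f //= k
--     return digits
-- ===== Notes on version B (the rewrite author's own statement) =====
-- stated objective: alternative
-- what changed: A runs one forward loop carrying a running factorial and tallying its leading digit as it goes; B computes (n-1)! once as a product and then walks DOWNWARD k=n-1..1, recovering each smaller factorial by exact division f //= k and tallying the leading digits in reverse order.
import Mathlib
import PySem

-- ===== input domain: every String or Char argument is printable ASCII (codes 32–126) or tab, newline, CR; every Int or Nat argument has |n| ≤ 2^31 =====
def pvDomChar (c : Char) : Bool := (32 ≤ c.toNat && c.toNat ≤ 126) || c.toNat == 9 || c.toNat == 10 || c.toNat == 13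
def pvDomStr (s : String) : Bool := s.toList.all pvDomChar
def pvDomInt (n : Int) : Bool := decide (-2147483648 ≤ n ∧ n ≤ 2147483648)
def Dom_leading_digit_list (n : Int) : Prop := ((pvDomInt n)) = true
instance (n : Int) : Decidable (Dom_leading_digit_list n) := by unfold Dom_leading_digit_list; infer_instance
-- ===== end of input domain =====

-- B replaces A's forward loop (a running factorial tallied as it grows) by a different
-- traversal: compute (n-1)! once as a product, then walk DOWNWARD k=n-1..1 recovering each
-- smaller factorial by exact division and tallying leading digits in reverse order.
-- Objective: alternative algorithm, same asymptotic cost.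

-- ===== PORT A =====
-- lead = ord(str(prod)[0]) - ord('0')   (the 'none' arm is unreachable: str(prod) is never empty)
def pvLeadA (p : Int) : Int :=
  match PySem.Str.pyGet? (PySem.Int.toStr p) 0 with
  | some c => (c.toNat : Int) - 48
  | none => 0

-- digits[lead] += 1  (Python index semantics; lead is always 1..9 here, so never an IndexError)
def pvBump (d : List Int) (lead : Int) : List Int :=
  PySem.List.pySetD d lead (PySem.List.pyGetD d lead 0 + 1)

def leading_digit_list (n : Int) : List Int :=
  ((PySem.List.pyRange 2 (n + 1) 1).foldl
    (fun st i => (st.1 * i, pvBump st.2 (pvLeadA st.1)))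
    (1, List.replicate 10 0)).2

-- ===== PORT B =====
-- int(str(f)[0])   (the 'none' arm is unreachable: str(f) is never empty)
def pvLeadB (v : Int) : Int :=
  match PySem.Str.pyGet? (PySem.Int.toStr v) 0 with
  | some c => (PySem.Int.ofStr? (String.ofList [c])).getD 0
  | none => 0

def leading_digit_list_alt (n : Int) : List Int :=
  -- f = (n-1)!  (first loop: plain product)
  let f := (PySem.List.pyRange 1 n 1).foldl (fun f k => f * k) 1
  -- second loop, k = n-1 .. 1: tally int(str(f)[0]), then f //= k
  ((PySem.List.pyRange (n - 1) 0 (-1)).foldl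
    (fun st k => (pvBump st.1 (pvLeadB st.2), PySem.Int.floordiv st.2 k))
    (List.replicate 10 0, f)).1

-- ===== PRECONDITION & SPEC =====
def Spec_leading_digit_list (n : Int) (out : List Int) : Prop := out = leading_digit_list_alt n
instance (n : Int) (out : List Int) : Decidable (Spec_leading_digit_list n out) := by unfold Spec_leading_digit_list; infer_instance

-- ===== CLAIM (what is proved, stated in full; the proofs are below) =====
def Claim_equal_leading_digit_list : Prop := ∀ (n : Int), Dom_leading_digit_list n → Spec_leading_digit_list n (leading_digit_list n)

-- ===== LEMMAS AND PROOFS =====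

-- top decimal digit of a natural number
def natTop (m : Nat) : Nat :=
  if h : m < 10 then m else natTop (m / 10)
termination_by m
decreasing_by exact Nat.div_lt_self (by omega) (by omega)

def facInt (k : Nat) : Int := (Nat.factorial k : Int)

-- [1!, 2!, ..., m!]
def ascFacts (m : Nat) : List Int := (List.range m).map (fun j => facInt (j + 1))

lemma ascFacts_succ (m : Nat) : ascFacts (m + 1) = ascFacts m ++ [facInt (m + 1)] := by
  simp [ascFacts, List.range_succ]

lemma ascFacts_pos : ∀ m, ∀ v ∈ ascFacts m, 1 ≤ v := by
  intro m v hv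
  simp only [ascFacts, List.mem_map] at hv
  obtain ⟨j, _, rfl⟩ := hv
  simp only [facInt]
  exact_mod_cast Nat.one_le_iff_ne_zero.mpr (Nat.factorial_pos (j + 1)).ne'

lemma natTop_lt : ∀ (fuel m : Nat), m ≤ fuel → natTop m < 10 := by
  intro fuel
  induction fuel with
  | zero => intro m h; rw [natTop, dif_pos (by omega : m < 10)]; omega
  | succ f ih =>
    intro m h
    rw [natTop]
    split
    · omega
    · exact ih (m / 10) (by omega)

lemma natTop_pos : ∀ (fuel m : Nat), m ≤ fuel → 1 ≤ m → 1 ≤ natTop m := by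
  intro fuel
  induction fuel with
  | zero => intro m h h1; omega
  | succ f ih =>
    intro m h h1
    rw [natTop]
    split
    · omega
    · exact ih (m / 10) (by omega) (by omega)

-- head of Nat.toDigits 10 is the digitChar of the top digit
lemma pvHeadCore : ∀ (f m : Nat) (acc : List Char), m < f →
    ∃ t, Nat.toDigitsCore 10 f m acc = (natTop m).digitChar :: t := by
  intro f
  induction f with
  | zero => intro m acc h; omega
  | succ f ih =>
    intro m acc h
    simp only [Nat.toDigitsCore]
    by_cases h10 : m / 10 = 0
    · rw [if_pos h10]
      have hm : m < 10 := by omega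
      rw [natTop, dif_pos hm, Nat.mod_eq_of_lt hm]
      exact ⟨acc, rfl⟩
    · rw [if_neg h10]
      have hm : ¬ m < 10 := by omega
      obtain ⟨t, ht⟩ := ih (m / 10) ((m % 10).digitChar :: acc) (by omega)
      have hnt : natTop m = natTop (m / 10) := by rw [natTop, dif_neg hm]
      rw [ht, hnt]
      exact ⟨t, rfl⟩

-- the first character of str(v), v ≥ 1, is the digitChar of v's top decimal digit
lemma pvHeadChar (v : Int) (hv : 1 ≤ v) :
    PySem.Str.pyGet? (PySem.Int.toStr v) 0 = some (natTop v.toNat).digitChar := by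
  obtain ⟨t, ht⟩ := pvHeadCore (v.toNat + 1) v.toNat [] (by omega)
  rw [PySem.Str.pyGet?, PySem.Int.toList_toStr, PySem.Int.toChars, if_neg (by omega : ¬ v < 0)]
  rw [show Nat.toDigits 10 v.toNat = (natTop v.toNat).digitChar :: t from ht]
  exact PySem.List.pyGet?_zero_cons _ t

lemma pvDigitChar_toNat (d : Nat) (h : d < 10) : (Nat.digitChar d).toNat = d + 48 := by
  interval_cases d <;> decide

lemma pvOfDigitChar (d : Nat) (h : d < 10) :
    (PySem.Int.ofStr? (String.ofList [d.digitChar])).getD 0 = (d : Int) := by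
  interval_cases d <;> decide

lemma pvLeadA_eq_nat (v : Int) (hv : 1 ≤ v) : pvLeadA v = ((natTop v.toNat : Nat) : Int) := by
  have hlt := natTop_lt v.toNat v.toNat le_rfl
  simp only [pvLeadA, pvHeadChar v hv, pvDigitChar_toNat _ hlt]
  push_cast
  ring

lemma pvLeadB_eq_nat (v : Int) (hv : 1 ≤ v) : pvLeadB v = ((natTop v.toNat : Nat) : Int) := by
  have hlt := natTop_lt v.toNat v.toNat le_rfl
  simp only [pvLeadB, pvHeadChar v hv]
  exact pvOfDigitChar _ hlt

-- A's and B's leading-digit extractions agree on v ≥ 1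
lemma pvLead_eq (v : Int) (hv : 1 ≤ v) : pvLeadB v = pvLeadA v := by
  rw [pvLeadA_eq_nat v hv, pvLeadB_eq_nat v hv]

-- bounds for the extracted index
lemma pvLeadB_bounds (v : Int) (hv : 1 ≤ v) : 1 ≤ pvLeadB v ∧ pvLeadB v < 10 := by
  rw [pvLeadB_eq_nat v hv]
  have h1 := natTop_lt v.toNat v.toNat le_rfl
  have h2 := natTop_pos v.toNat v.toNat le_rfl (by omega)
  omega

-- products of A's loop, taken BEFORE each multiplication
def pvPre (p : Int) : List Int → List Int
  | [] => []
  | i :: t => p :: pvPre (p * i) t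

-- values tallied by B's second loop: f, f//k1, (f//k1)//k2, ...
def pvVals (f : Int) : List Int → List Int
  | [] => []
  | k :: t => f :: pvVals (PySem.Int.floordiv f k) t

lemma pvA_fold : ∀ (l : List Int) (p : Int) (d : List Int),
    (l.foldl (fun st i => (st.1 * i, pvBump st.2 (pvLeadA st.1))) (p, d)).2
      = (pvPre p l).foldl (fun d v => pvBump d (pvLeadA v)) d := by
  intro l
  induction l with
  | nil => intro p d; rfl
  | cons i t ih => intro p d; simp only [List.foldl, pvPre]; exact ih (p * i) _

lemma pvB_fold : ∀ (l : List Int) (f : Int) (d : List Int),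
    (l.foldl (fun st k => (pvBump st.1 (pvLeadB st.2), PySem.Int.floordiv st.2 k)) (d, f)).1
      = (pvVals f l).foldl (fun d v => pvBump d (pvLeadB v)) d := by
  intro l
  induction l with
  | nil => intro f d; rfl
  | cons k t ih => intro f d; simp only [List.foldl, pvVals]; exact ih _ _

lemma pvPre_append (z : Int) : ∀ (l : List Int) (p : Int),
    pvPre p (l ++ [z]) = pvPre p l ++ [p * l.prod] := by
  intro l
  induction l with
  | nil => intro p; simp [pvPre]
  | cons x t ih =>
    intro p
    simp only [List.cons_append, pvPre, List.prod_cons, ih (p * x)]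
    rw [mul_assoc]

-- A's tallied values are 1!..m! in ascending order (and the range's product is (m+1)!)
lemma pvA_list : ∀ m : Nat,
    pvPre 1 (PySem.List.pyRange 2 (2 + (m : Int)) 1) = ascFacts m ∧
    (PySem.List.pyRange 2 (2 + (m : Int)) 1).prod = facInt (m + 1) := by
  intro m
  induction m with
  | zero =>
    rw [show (2 + ((0:Nat) : Int)) = 2 by norm_num, PySem.List.pyRange_one_eq_nil le_rfl]
    exact ⟨rfl, by simp [facInt]⟩
  | succ m ih =>
    have hsp : (2 + ((m + 1 : Nat) : Int)) = (2 + (m : Int)) + 1 := by push_cast; ring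
    rw [hsp, PySem.List.pyRange_one_succ_right (by omega : (2:Int) ≤ 2 + (m : Int))]
    constructor
    · rw [pvPre_append, ih.1, ih.2, ascFacts_succ, one_mul]
    · rw [List.prod_append, ih.2]
      simp only [List.prod_cons, List.prod_nil, facInt, Nat.factorial_succ]
      push_cast
      ring

-- B's first loop computes m!  (n = 1 + m)
lemma pvB_prod : ∀ m : Nat, (PySem.List.pyRange 1 (1 + (m : Int)) 1).prod = facInt m := by
  intro m
  induction m with
  | zero =>
    rw [show (1 + ((0:Nat) : Int)) = 1 by norm_num, PySem.List.pyRange_one_eq_nil le_rfl]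
    simp [facInt]
  | succ m ih =>
    have hsp : (1 + ((m + 1 : Nat) : Int)) = (1 + (m : Int)) + 1 := by push_cast; ring
    rw [hsp, PySem.List.pyRange_one_succ_right (by omega : (1:Int) ≤ 1 + (m : Int)),
        List.prod_append, ih]
    simp only [List.prod_cons, List.prod_nil, facInt, Nat.factorial_succ]
    push_cast
    ring

-- exact division peels one factorial: (m+1)! // (m+1) = m!
lemma pvFac_div (m : Nat) : PySem.Int.floordiv (facInt (m + 1)) ((m : Int) + 1) = facInt m := by
  have h1 : facInt (m + 1) = (((m + 1) * Nat.factorial m : Nat) : Int) := by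
    simp [facInt, Nat.factorial_succ]
  have h2 : ((m : Int) + 1) = (((m + 1 : Nat)) : Int) := by push_cast; ring
  rw [h1, h2, PySem.Int.floordiv_natCast]
  rw [Nat.mul_div_cancel_left _ (by omega : 0 < m + 1)]
  rfl

-- B's second loop visits m!, (m-1)!, ..., 1! — A's list reversed
lemma pvB_list : ∀ m : Nat,
    pvVals (facInt m) (PySem.List.pyRange (m : Int) 0 (-1)) = (ascFacts m).reverse := by
  intro m
  induction m with
  | zero =>
    rw [show ((0:Nat) : Int) = 0 by norm_num, PySem.List.pyRange_neg_one_eq_nil le_rfl]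
    rfl
  | succ m ih =>
    have hc : PySem.List.pyRange ((m + 1 : Nat) : Int) 0 (-1)
        = ((m : Int) + 1) :: PySem.List.pyRange ((m : Int)) 0 (-1) := by
      have := PySem.List.pyRange_neg_one_cons (a := ((m + 1 : Nat) : Int)) (b := 0)
        (by push_cast; omega)
      rw [this]
      push_cast
      norm_num
    rw [hc]
    simp only [pvVals, pvFac_div, ih, ascFacts_succ, List.reverse_append]
    rfl

-- bump preserves length
lemma pvBump_length (d : List Int) (a : Int) : (pvBump d a).length = d.length := by
  simp [pvBump, PySem.List.length_pySetD]

-- pvBump at a nonnegative in-range index, in List.set/getElem form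
lemma pvBump_eq (d : List Int) (a : Int) (ha0 : 0 ≤ a) (ha : a < d.length) :
    pvBump d a = d.set a.toNat (d[a.toNat]'(by omega) + 1) := by
  rw [pvBump, PySem.List.pySetD_of_nonneg d _ ha0, PySem.List.pyGetD_eq_getElem d _ ha0 ha]

-- two bumps at in-range nonnegative indices commute
lemma pvBump_comm (d : List Int) (a b : Int)
    (ha0 : 0 ≤ a) (ha : a < d.length) (hb0 : 0 ≤ b) (hb : b < d.length) :
    pvBump (pvBump d a) b = pvBump (pvBump d b) a := by
  by_cases hab : a = b
  · rw [hab]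
  · have hne : a.toNat ≠ b.toNat := by omega
    rw [pvBump_eq d a ha0 ha, pvBump_eq d b hb0 hb,
        pvBump_eq _ b hb0 (by simpa [List.length_set] using hb),
        pvBump_eq _ a ha0 (by simpa [List.length_set] using ha),
        List.getElem_set_ne (by omega), List.getElem_set_ne (by omega)]
    exact List.set_comm _ _ (by omega)

-- the bump step commutes past a whole fold (all indices stay in range)
lemma pvFold_pull : ∀ (l : List Int) (d : List Int), d.length = 10 → (∀ v ∈ l, 1 ≤ v) →
    ∀ a, 1 ≤ a →
    l.foldl (fun d v => pvBump d (pvLeadB v)) (pvBump d (pvLeadB a))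
      = pvBump (l.foldl (fun d v => pvBump d (pvLeadB v)) d) (pvLeadB a) := by
  intro l
  induction l with
  | nil => intro d _ _ a _; rfl
  | cons x t ih =>
    intro d hd hl a ha
    have hx : 1 ≤ x := hl x (by simp)
    obtain ⟨ha1, ha2⟩ := pvLeadB_bounds a ha
    obtain ⟨hx1, hx2⟩ := pvLeadB_bounds x hx
    simp only [List.foldl]
    rw [pvBump_comm d (pvLeadB a) (pvLeadB x) (by omega) (by omega) (by omega) (by omega)]
    exact ih _ (by rw [pvBump_length, hd]) (fun v hv => hl v (by simp [hv])) a ha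

-- folding bumps over the reversed list gives the same table
lemma pvFold_reverse : ∀ (l : List Int) (d : List Int), d.length = 10 → (∀ v ∈ l, 1 ≤ v) →
    l.reverse.foldl (fun d v => pvBump d (pvLeadB v)) d
      = l.foldl (fun d v => pvBump d (pvLeadB v)) d := by
  intro l
  induction l with
  | nil => intro d _ _; rfl
  | cons x t ih =>
    intro d hd hl
    have hx : 1 ≤ x := hl x (by simp)
    simp only [List.reverse_cons, List.foldl_append, List.foldl_cons, List.foldl_nil]
    rw [ih d hd (fun v hv => hl v (by simp [hv]))]
    exact (pvFold_pull t d hd (fun v hv => hl v (by simp [hv])) x hx).symm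

-- ===== VERDICT (by name: the statement is the Claim_ definition above) =====
theorem leading_digit_list_spec : Claim_equal_leading_digit_list := by
  intro n _
  unfold Spec_leading_digit_list leading_digit_list leading_digit_list_alt
  by_cases hn : n ≤ 0
  · rw [PySem.List.pyRange_one_eq_nil (by omega : n + 1 ≤ 2),
        PySem.List.pyRange_one_eq_nil (by omega : n ≤ 1),
        PySem.List.pyRange_neg_one_eq_nil (by omega : n - 1 ≤ 0)]
    rfl
  · set m : Nat := (n - 1).toNat with hm
    have hA : (2 : Int) + (m : Int) = n + 1 := by omega
    have hB1 : (1 : Int) + (m : Int) = n := by omega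
    have hB2 : (m : Int) = n - 1 := by omega
    -- A's side
    rw [pvA_fold]
    rw [show PySem.List.pyRange 2 (n + 1) 1 = PySem.List.pyRange 2 (2 + (m : Int)) 1 by rw [hA]]
    rw [(pvA_list m).1]
    -- B's side
    simp only []
    rw [pvB_fold]
    rw [show (PySem.List.pyRange 1 n 1).foldl (fun f k => f * k) 1
          = (PySem.List.pyRange 1 (1 + (m : Int)) 1).prod by
        rw [hB1, List.prod_eq_foldl]]
    rw [pvB_prod m, ← hB2, pvB_list m]
    rw [pvFold_reverse (ascFacts m) _ (by simp) (ascFacts_pos m)]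
    exact (PySem.List.foldl_congr_mem _ _ _ _
      (fun acc v hv => by rw [pvLead_eq v (ascFacts_pos m v hv)])).symm
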